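-- pv_equiv track=rewrite | github.com/snumrl/Splines | cornercut.py | numLatentPoints
-- ===== SOURCE A (Python) =====
-- def numLatentPoints( num, level, closed ):
--     yield 0   # No latent control points
--
--     if num>2:
--         n = num
--         if closed:
--             n = num + 2
--
--         for i in range(level):
--             n = 2*n - 2
--         yield n
--     else:
--         yield 0
-- ===== SOURCE B (Python) =====
-- def numLatentPoints(num, level, closed):
--     yield 0   # No latent control points
--     if num <= 2:
--         yield 0
--         return
--     n0 = num + 2 if closed else num
--     # closed form of the doubling recurrence; max(level, 0) matches the empty range
--     yield ((n0 - 2) << max(level, 0)) + 2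
-- ===== Notes on version B (the rewrite author's own statement) =====
-- stated objective: simpler
-- what changed: The recurrence loop 'for i in range(level): n = 2*n-2' is replaced by the unguarded closed form (n0-2)*2^max(level,0)+2 (a shift), with an early-return on num<=2 instead of A's if/else nesting.
import Mathlib
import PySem

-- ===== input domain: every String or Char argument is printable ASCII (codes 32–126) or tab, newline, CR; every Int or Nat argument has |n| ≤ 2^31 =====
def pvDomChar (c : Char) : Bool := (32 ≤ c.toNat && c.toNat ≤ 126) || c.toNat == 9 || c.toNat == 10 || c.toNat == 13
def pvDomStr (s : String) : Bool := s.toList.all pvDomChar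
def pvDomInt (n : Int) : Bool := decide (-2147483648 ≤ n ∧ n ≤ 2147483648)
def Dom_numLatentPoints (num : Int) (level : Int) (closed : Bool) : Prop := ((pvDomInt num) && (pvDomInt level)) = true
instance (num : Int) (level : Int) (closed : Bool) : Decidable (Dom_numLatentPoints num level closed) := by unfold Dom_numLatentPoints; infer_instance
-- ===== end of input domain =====

-- B replaces A's doubling recurrence loop with the closed form (n0-2)*2^max(level,0)+2, using an early return instead of if/else (simpler).

-- ===== PORT A =====
def numLatentPoints (num : Int) (level : Int) (closed : Bool) : List Int :=
  [0] ++
  (if num > 2 then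
    let n := if closed then num + 2 else num
    [(PySem.List.pyRange 0 level 1).foldl (fun n _ => 2 * n - 2) n]
  else [0])

-- ===== PORT B =====
def numLatentPoints_alt (num : Int) (level : Int) (closed : Bool) : List Int :=
  if num ≤ 2 then [0, 0]
  else
    let n0 : Int := if closed then num + 2 else num
    [0, (n0 - 2) * 2 ^ (max level 0).toNat + 2]

-- ===== PRECONDITION & SPEC =====
def Spec_numLatentPoints (num : Int) (level : Int) (closed : Bool) (out : List Int) : Prop := out = numLatentPoints_alt num level closed
instance (num : Int) (level : Int) (closed : Bool) (out : List Int) : Decidable (Spec_numLatentPoints num level closed out) := by unfold Spec_numLatentPoints; infer_instance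

-- ===== CLAIM (what is proved, stated in full; the proofs are below) =====
def Claim_equal_numLatentPoints : Prop := ∀ (num : Int) (level : Int) (closed : Bool), Dom_numLatentPoints num level closed → Spec_numLatentPoints num level closed (numLatentPoints num level closed)

-- ===== LEMMAS AND PROOFS =====

-- A's loop computes the closed form: invariant of the doubling recurrence.
theorem foldl_double_sub {α : Type} (l : List α) (n : Int) :
    l.foldl (fun m _ => 2 * m - 2) n = (n - 2) * 2 ^ l.length + 2 := by
  induction l generalizing n with
  | nil => simp
  | cons a t ih =>
    simp only [List.foldl, ih (2 * n - 2), List.length_cons, pow_succ]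
    ring

-- A's loop over range(level) equals B's closed form.
theorem loop_closed (level n0 : Int) :
    (PySem.List.pyRange 0 level 1).foldl (fun m _ => 2 * m - 2) n0
      = (n0 - 2) * 2 ^ (max level 0).toNat + 2 := by
  rw [foldl_double_sub, PySem.List.length_pyRange_one,
    show (level - 0).toNat = (max level 0).toNat by omega]

-- ===== VERDICT (by name: the statement is the Claim_ definition above) =====
theorem numLatentPoints_spec : Claim_equal_numLatentPoints := by
  intro num level closed _
  by_cases h : num ≤ 2
  · simp [Spec_numLatentPoints, numLatentPoints, numLatentPoints_alt, h, show ¬ num > 2 by omega]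
  · simp [Spec_numLatentPoints, numLatentPoints, numLatentPoints_alt, loop_closed, h, show num > 2 by omega]
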